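-- pv_equiv track=rewrite | github.com/FrancoARossi/SySdL-TPs | pruebas.py | a_Minus
-- ===== SOURCE A (Python) =====
-- def a_Minus (word):
-- 	s = 0
-- 	for c in word:
-- 		if s == 0 and c == '-':
-- 			s = 1
-- 		else:
-- 			s = -1
-- 			break
-- 	return (s == 1)
-- ===== SOURCE B (Python) =====
-- def a_Minus(word):
--     return list(word) == ['-']
-- ===== Notes on version B (the rewrite author's own statement) =====
-- stated objective: simpler
-- what changed: Replaces the stateful early-break scan (s flag) by materializing the iterable and comparing it structurally to ['-'].
import Mathlib
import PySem

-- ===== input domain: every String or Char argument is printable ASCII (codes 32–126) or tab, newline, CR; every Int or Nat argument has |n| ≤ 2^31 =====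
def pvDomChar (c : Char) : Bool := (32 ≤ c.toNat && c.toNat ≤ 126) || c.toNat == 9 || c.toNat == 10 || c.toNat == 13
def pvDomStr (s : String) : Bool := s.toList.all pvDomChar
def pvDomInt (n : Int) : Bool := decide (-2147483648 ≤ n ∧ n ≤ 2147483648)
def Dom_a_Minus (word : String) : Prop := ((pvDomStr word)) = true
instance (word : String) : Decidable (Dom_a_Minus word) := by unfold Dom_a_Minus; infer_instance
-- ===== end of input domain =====

-- B drops A's state flag and early-break loop: it materializes the characters and compares to ['-'].

-- ===== PORT A =====
-- the for-loop with the early `break`: state s, stop (returning -1) when the branch fires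
def aMinusLoop (s : Int) (cs : List Char) : Int :=
  match cs with
  | [] => s
  | c :: rest => if s = 0 ∧ c = '-' then aMinusLoop 1 rest else -1

def a_Minus (word : String) : Bool :=
  aMinusLoop 0 word.toList == 1

-- ===== PORT B =====
def a_Minus_alt (word : String) : Bool :=
  word.toList == ['-']

-- ===== PRECONDITION & SPEC =====
def Spec_a_Minus (word : String) (out : Bool) : Prop := out = a_Minus_alt word
instance (word : String) (out : Bool) : Decidable (Spec_a_Minus word out) := by unfold Spec_a_Minus; infer_instance

-- ===== CLAIM (what is proved, stated in full; the proofs are below) =====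
def Claim_equal_a_Minus : Prop := ∀ (word : String), Dom_a_Minus word → Spec_a_Minus word (a_Minus word)

-- ===== LEMMAS AND PROOFS =====
theorem aMinusLoop_eq (cs : List Char) : (aMinusLoop 0 cs == 1) = (cs == ['-']) := by
  match cs with
  | [] => decide
  | [c] =>
    simp only [aMinusLoop]
    by_cases h : c = '-' <;> simp [h]
  | c :: d :: rest =>
    simp only [aMinusLoop]
    by_cases h : c = '-' <;> simp [h]

-- ===== VERDICT (by name: the statement is the Claim_ definition above) =====
theorem a_Minus_spec : Claim_equal_a_Minus := by
  intro word _
  unfold Spec_a_Minus a_Minus a_Minus_alt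
  exact aMinusLoop_eq word.toList
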